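-- pv_equiv track=rewrite | github.com/sn00py666/MireaFulstekProblemSolving | Алгоритмы и структуры данных/РТ 2/алг_рт2_з6.py | sundaram
-- ===== SOURCE A (Python) =====
-- def sundaram(n):
--     new_n = (n-1)//2
--     arr = [i for i in range(1, (n-1)//2+1)]
--     for i in range(1, new_n+1):
--         for j in range(1, new_n+1):
--             if i + j + 2 * i * j > len(arr):
--                 break
--             elif i + j + 2 * i * j in arr:
--                 arr[(i + j + 2 * i * j)-1] = 0
--     arr = list(filter(lambda x: x != 0, arr))
--     arr = list(map(lambda x: x*2 + 1, arr))
--     return arr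
-- ===== SOURCE B (Python) =====
-- def _is_odd_prime(c):
--     d = 3
--     while d * d <= c:
--         if c % d == 0:
--             return False
--         d += 2
--     return True
--
--
-- def sundaram(n):
--     m = (n - 1) // 2
--     top = 2 * m + 1
--     return [c for c in range(3, top + 1, 2) if _is_odd_prime(c)]
-- ===== Notes on version B (the rewrite author's own statement) =====
-- stated objective: faster
-- what changed: Replaces Sundaram's i+j+2ij marking over a list with O(m) membership scans and in-place zeroing by direct trial division of each odd candidate up to its square root.
import Mathlib
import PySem

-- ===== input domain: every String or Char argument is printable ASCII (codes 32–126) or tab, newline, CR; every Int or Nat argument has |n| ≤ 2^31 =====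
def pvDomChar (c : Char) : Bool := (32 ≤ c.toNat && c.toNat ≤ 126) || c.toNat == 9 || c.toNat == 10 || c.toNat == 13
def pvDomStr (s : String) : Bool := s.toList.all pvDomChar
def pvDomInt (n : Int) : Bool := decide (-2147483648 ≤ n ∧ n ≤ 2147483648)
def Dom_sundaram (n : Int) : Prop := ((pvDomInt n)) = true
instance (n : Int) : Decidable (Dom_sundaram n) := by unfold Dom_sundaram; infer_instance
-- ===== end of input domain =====

-- B replaces Sundaram's i+j+2ij marking (with its O(m) 'in arr' scans) by trial
-- division of each odd candidate; objective: faster.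

-- ===== PORT A =====
-- the inner 'for j' loop with its break / elif chain, in source order
-- (the index (i+j+2ij)-1 is nonnegative whenever the branch fires, since i,j ≥ 1)
def pvInner (i : Int) (arr : List Int) : List Int → List Int
  | [] => arr
  | j :: js =>
    if i + j + 2 * i * j > (arr.length : Int) then arr
    else if (i + j + 2 * i * j) ∈ arr then
      pvInner i (PySem.List.pySetD arr ((i + j + 2 * i * j) - 1) 0) js
    else pvInner i arr js

def sundaram (n : Int) : List Int :=
  let new_n := PySem.Int.floordiv (n - 1) 2
  let arr := PySem.List.pyRange 1 (PySem.Int.floordiv (n - 1) 2 + 1) 1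
  let arr2 := (PySem.List.pyRange 1 (new_n + 1) 1).foldl
    (fun a i => pvInner i a (PySem.List.pyRange 1 (new_n + 1) 1)) arr
  let arr3 := arr2.filter (fun x => x != 0)
  arr3.map (fun x => x * 2 + 1)

-- ===== PORT B =====
-- the 'while d*d <= c' trial-division loop of _is_odd_prime; the Nat fuel is only a
-- totality guard (it never runs out: the loop body needs at most (c+2-d).toNat steps)
def pvIsOddPrimeFuel (c : Int) : Nat → Int → Bool
  | 0, _ => true
  | N + 1, d =>
    if d * d ≤ c then
      if PySem.Int.mod c d == 0 then false
      else pvIsOddPrimeFuel c N (d + 2)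
    else true

def pvIsOddPrime (c : Int) (d : Int) : Bool :=
  pvIsOddPrimeFuel c (c + 2 - d).toNat d

def sundaram_alt (n : Int) : List Int :=
  let m := PySem.Int.floordiv (n - 1) 2
  let top := 2 * m + 1
  (PySem.List.pyRange 3 (top + 1) 2).filter (fun c => pvIsOddPrime c 3)

-- ===== PRECONDITION & SPEC =====
def Spec_sundaram (n : Int) (out : List Int) : Prop := out = sundaram_alt n
instance (n : Int) (out : List Int) : Decidable (Spec_sundaram n out) := by unfold Spec_sundaram; infer_instance

-- ===== CLAIM (what is proved, stated in full; the proofs are below) =====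
def Claim_equal_sundaram : Prop := ∀ (n : Int), Dom_sundaram n → Spec_sundaram n (sundaram n)

-- ===== LEMMAS AND PROOFS =====

-- The evolving array of A: position k-1 holds 0 if P k, else k, for k = 1..m.
def pvCodeArr (m : Int) (P : Int → Bool) : List Int :=
  (PySem.List.pyRange 1 (m + 1) 1).map (fun k => if P k then 0 else k)

theorem pvCodeArr_congr {m : Int} {P Q : Int → Bool}
    (h : ∀ k : Int, 1 ≤ k → k ≤ m → P k = Q k) : pvCodeArr m P = pvCodeArr m Q := by
  unfold pvCodeArr
  apply List.map_congr_left
  intro k hk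
  rw [PySem.List.mem_pyRange_one] at hk
  rw [h k hk.1 (by omega)]

theorem pvCodeArr_length {m : Int} (hm : 0 ≤ m) (P : Int → Bool) :
    ((pvCodeArr m P).length : Int) = m := by
  unfold pvCodeArr
  rw [List.length_map, PySem.List.length_pyRange_one]
  omega

theorem pvCodeArr_mem {m v : Int} (P : Int → Bool) (hv : 1 ≤ v) :
    v ∈ pvCodeArr m P ↔ (v ≤ m ∧ P v = false) := by
  unfold pvCodeArr
  simp only [List.mem_map, PySem.List.mem_pyRange_one]
  constructor
  · rintro ⟨k, ⟨hk1, hk2⟩, he⟩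
    by_cases h : P k
    · simp [h] at he; omega
    · simp [h] at he; subst he; exact ⟨by omega, by simpa using h⟩
  · rintro ⟨h1, h2⟩
    exact ⟨v, ⟨hv, by omega⟩, by simp [h2]⟩

theorem pvCodeArr_set {m v : Int} (P : Int → Bool) (hv : 1 ≤ v) (_hvm : v ≤ m) :
    PySem.List.pySetD (pvCodeArr m P) (v - 1) 0
      = pvCodeArr m (fun k => P k || (k == v)) := by
  rw [show PySem.List.pySetD (pvCodeArr m P) (v - 1) 0 = (pvCodeArr m P).set (v - 1).toNat 0 from
    PySem.List.pySetD_of_nonneg _ _ (by omega)]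
  unfold pvCodeArr
  apply List.ext_getElem
  · simp
  · intro t h1 h2
    rw [List.getElem_set]
    simp only [List.getElem_map, PySem.List.getElem_pyRange_one]
    have hb : t < (m + 1 - 1).toNat := by
      simpa [PySem.List.length_pyRange_one] using h2
    by_cases ht : (v - 1).toNat = t
    · have hkv : (1 : Int) + t = v := by omega
      rw [if_pos ht]
      have : ((1 : Int) + t == v) = true := by simp [hkv]
      simp [this]
    · have hkv : ¬ ((1 : Int) + t = v) := by omega
      rw [if_neg ht]
      have : ((1 : Int) + t == v) = false := by simp [hkv]
      simp [this]

theorem pvInner_eq {m : Int} (hm : 0 ≤ m) (i : Int) (hi : 1 ≤ i) :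
    ∀ js : List Int, js.Pairwise (· ≤ ·) → (∀ j ∈ js, 1 ≤ j) → ∀ P : Int → Bool,
    pvInner i (pvCodeArr m P) js
      = pvCodeArr m (fun k => P k || js.any (fun j => i + j + 2 * i * j == k)) := by
  intro js
  induction js with
  | nil =>
    intro _ _ P
    simp [pvInner]
  | cons j js ih =>
    intro hs hpos P
    have hj1 : 1 ≤ j := hpos j (by simp)
    have hv1 : 1 ≤ i + j + 2 * i * j := by nlinarith
    have hlen := pvCodeArr_length hm P
    rw [pvInner]
    by_cases hbr : i + j + 2 * i * j > ((pvCodeArr m P).length : Int)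
    · rw [if_pos hbr]
      rw [hlen] at hbr
      apply pvCodeArr_congr
      intro k hk1 hk2
      have hany : (j :: js).any (fun j' => i + j' + 2 * i * j' == k) = false := by
        rw [List.any_eq_false]
        intro j' hj'
        have hjj : j ≤ j' := by
          rcases List.mem_cons.1 hj' with h | h
          · omega
          · exact (List.pairwise_cons.1 hs).1 j' h
        have hmono : i + j + 2 * i * j ≤ i + j' + 2 * i * j' := by nlinarith
        simp only [beq_iff_eq]
        omega
      rw [hany, Bool.or_false]
    · rw [if_neg hbr]
      rw [hlen] at hbr
      have hvm : i + j + 2 * i * j ≤ m := by omega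
      have htail : ∀ j' ∈ js, 1 ≤ j' := fun j' h => hpos j' (List.mem_cons_of_mem _ h)
      by_cases hP : P (i + j + 2 * i * j) = false
      · have hmem : (i + j + 2 * i * j) ∈ pvCodeArr m P :=
          (pvCodeArr_mem P hv1).2 ⟨hvm, hP⟩
        rw [if_pos hmem, pvCodeArr_set P hv1 hvm,
          ih (List.pairwise_cons.1 hs).2 htail (fun k => P k || (k == i + j + 2 * i * j))]
        apply pvCodeArr_congr
        intro k hk1 hk2
        simp only [List.any_cons]
        by_cases hkv : k = i + j + 2 * i * j
        · subst hkv
          simp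
        · have h1 : (k == i + j + 2 * i * j) = false := by simp [hkv]
          have h2 : (i + j + 2 * i * j == k) = false := by
            simp; omega
          rw [h1, h2]
          simp
      · have hPt : P (i + j + 2 * i * j) = true := by
          cases h : P (i + j + 2 * i * j)
          · exact absurd h hP
          · rfl
        have hmem : (i + j + 2 * i * j) ∉ pvCodeArr m P := by
          rw [pvCodeArr_mem P hv1]
          rintro ⟨_, h⟩
          rw [hPt] at h
          exact Bool.true_eq_false.mp h
        rw [if_neg hmem, ih (List.pairwise_cons.1 hs).2 htail P]
        apply pvCodeArr_congr
        intro k hk1 hk2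
        simp only [List.any_cons]
        by_cases hkv : i + j + 2 * i * j = k
        · rw [← hkv, hPt]
          simp
        · have h2 : (i + j + 2 * i * j == k) = false := by simp [hkv]
          rw [h2]
          simp

theorem pvOuter_eq {m : Int} (hm : 0 ≤ m) :
    ∀ is : List Int, (∀ i ∈ is, 1 ≤ i) → ∀ P : Int → Bool,
    is.foldl (fun a i => pvInner i a (PySem.List.pyRange 1 (m + 1) 1)) (pvCodeArr m P)
      = pvCodeArr m (fun k => P k || is.any (fun i =>
          (PySem.List.pyRange 1 (m + 1) 1).any (fun j => i + j + 2 * i * j == k))) := by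
  have hsorted : (PySem.List.pyRange 1 (m + 1) 1).Pairwise (· ≤ ·) :=
    (PySem.List.pairwise_lt_pyRange_one 1 (m + 1)).imp (fun h => le_of_lt h)
  have hmem1 : ∀ j ∈ PySem.List.pyRange 1 (m + 1) 1, (1 : Int) ≤ j := by
    intro j hj
    exact ((PySem.List.mem_pyRange_one).1 hj).1
  intro is
  induction is with
  | nil =>
    intro _ P
    simp [List.foldl_nil]
  | cons i is ih =>
    intro hpos P
    rw [List.foldl_cons,
      pvInner_eq hm i (hpos i (by simp)) _ hsorted hmem1 P,
      ih (fun i' h => hpos i' (List.mem_cons_of_mem _ h))]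
    apply pvCodeArr_congr
    intro k _ _
    simp only [List.any_cons, Bool.or_assoc]

theorem pvFilter_code_aux (P : Int → Bool) :
    ∀ l : List Int, (∀ k ∈ l, 1 ≤ k) →
    (l.map (fun k => if P k then 0 else k)).filter (fun x => x != 0)
      = l.filter (fun k => !P k) := by
  intro l
  induction l with
  | nil => intro _; simp
  | cons k l ih =>
    intro h
    have hk : (1 : Int) ≤ k := h k (by simp)
    have htail := fun k' h' => h k' (List.mem_cons_of_mem _ h')
    by_cases hP : P k
    · simp [hP, ih htail]
    · have : (k != 0) = true := by simp; omega
      simp [hP, this, ih htail]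

theorem pvOdds (m : Int) :
    PySem.List.pyRange 3 (2 * m + 1 + 1) 2
      = (PySem.List.pyRange 1 (m + 1) 1).map (fun k => k * 2 + 1) := by
  rw [PySem.List.pyRange_of_pos 3 (2 * m + 1 + 1) (by norm_num), PySem.List.pyRange_one]
  by_cases hm : 1 ≤ m
  · rw [if_pos (by omega)]
    have h1 : (2 * m + 1 + 1 - 3 + 2 - 1) / 2 = m := by omega
    have h2 : (m + 1 - 1).toNat = m.toNat := by omega
    rw [h1, h2, List.map_map]
    apply List.map_congr_left
    intro k _
    simp only [Function.comp]
    ring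
  · rw [if_neg (by omega)]
    simp
    omega

theorem pvTrial_false_iff (c : Int) :
    ∀ N : Nat, ∀ d : Int, 1 ≤ d → (c + 2 - d).toNat ≤ N →
    (pvIsOddPrimeFuel c N d = false ↔ ∃ e, d ≤ e ∧ (e - d) % 2 = 0 ∧ e * e ≤ c ∧ e ∣ c) := by
  intro N
  induction N with
  | zero =>
    intro d hd hN
    have hdc : ¬ d * d ≤ c := by
      intro h
      have h1 : 2 * d - 1 ≤ c := by nlinarith [sq_nonneg (d - 1)]
      omega
    rw [pvIsOddPrimeFuel]
    constructor
    · intro h; exact absurd h (by simp)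
    · rintro ⟨e, h1, _, h3, _⟩
      have : d * d ≤ e * e := mul_le_mul h1 h1 (by omega) (by omega)
      exact absurd (le_trans this h3) hdc
  | succ N ih =>
    intro d hd hN
    rw [pvIsOddPrimeFuel]
    by_cases hdc : d * d ≤ c
    · rw [if_pos hdc]
      by_cases hmod : (PySem.Int.mod c d == 0) = true
      · rw [if_pos hmod]
        have hdvd : d ∣ c := (PySem.Int.mod_eq_zero_iff_dvd c d).1 (by simpa using hmod)
        constructor
        · intro _; exact ⟨d, le_refl d, by omega, hdc, hdvd⟩
        · intro _; rfl
      · rw [if_neg hmod]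
        have hnd : ¬ d ∣ c := by
          rw [← PySem.Int.mod_eq_zero_iff_dvd]
          simpa using hmod
        have h1 : 2 * d - 1 ≤ c := by nlinarith [sq_nonneg (d - 1)]
        have h2 : (0:Int) ≤ c := le_trans (mul_self_nonneg d) hdc
        rw [ih (d + 2) (by omega) (by omega)]
        constructor
        · rintro ⟨e, he1, he2, he3, he4⟩
          exact ⟨e, by omega, by omega, he3, he4⟩
        · rintro ⟨e, he1, he2, he3, he4⟩
          have hne : e ≠ d := fun h => hnd (h ▸ he4)
          exact ⟨e, by omega, by omega, he3, he4⟩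
    · rw [if_neg hdc]
      constructor
      · intro h; exact absurd h (by simp)
      · rintro ⟨e, h1, _, h3, _⟩
        have : d * d ≤ e * e := mul_le_mul h1 h1 (by omega) (by omega)
        exact absurd (le_trans this h3) hdc

theorem pvBridge (k : Int) (hk : 1 ≤ k) :
    (∃ i j : Int, 1 ≤ i ∧ 1 ≤ j ∧ i + j + 2 * i * j = k)
      ↔ ∃ e, 3 ≤ e ∧ (e - 3) % 2 = 0 ∧ e * e ≤ k * 2 + 1 ∧ e ∣ (k * 2 + 1) := by
  constructor
  · rintro ⟨i, j, hi, hj, hij⟩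
    rcases le_total i j with h | h
    · refine ⟨2 * i + 1, by omega, by omega, by nlinarith, ⟨2 * j + 1, by linarith [hij]; ⟩⟩
    · refine ⟨2 * j + 1, by omega, by omega, by nlinarith, ⟨2 * i + 1, by nlinarith⟩⟩
  · rintro ⟨e, he3, hpar, hsq, f, hef⟩
    have hepos : (0:Int) < e := by omega
    have hcpos : (0:Int) < k * 2 + 1 := by omega
    have hfpos : (0:Int) < f := by
      by_contra h
      have h' : f ≤ 0 := by omega
      have : e * f ≤ 0 := mul_nonpos_of_nonneg_of_nonpos (by omega) h'
      omega
    have hef' : e ≤ f := by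
      have : e * e ≤ e * f := hef ▸ hsq
      exact le_of_mul_le_mul_left this hepos
    have hfodd : f % 2 = 1 := by
      rcases Int.even_or_odd f with ⟨t, ht⟩ | ⟨t, ht⟩
      · exfalso
        have : k * 2 + 1 = 2 * (e * t) := by rw [hef, ht]; ring
        omega
      · omega
    refine ⟨(e - 1) / 2, (f - 1) / 2, by omega, by omega, ?_⟩
    have hi2 : 2 * ((e - 1) / 2) + 1 = e := by omega
    have hj2 : 2 * ((f - 1) / 2) + 1 = f := by omega
    have hprod : k * 2 + 1 = (2 * ((e - 1) / 2) + 1) * (2 * ((f - 1) / 2) + 1) := by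
      rw [hi2, hj2]; exact hef
    nlinarith [hprod]

-- A with its inner quirks removed: for k in [1,m], marked ↔ some i,j ≥ 1 reach it
theorem pvMark_iff {m k : Int} (hk1 : 1 ≤ k) (hkm : k < m + 1) :
    ((PySem.List.pyRange 1 (m + 1) 1).any (fun i =>
        (PySem.List.pyRange 1 (m + 1) 1).any (fun j => i + j + 2 * i * j == k))) = true
      ↔ (∃ i j : Int, 1 ≤ i ∧ 1 ≤ j ∧ i + j + 2 * i * j = k) := by
  simp only [List.any_eq_true, beq_iff_eq, PySem.List.mem_pyRange_one]
  constructor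
  · rintro ⟨i, hi, j, hj, he⟩
    exact ⟨i, j, hi.1, hj.1, he⟩
  · rintro ⟨i, j, hi, hj, he⟩
    refine ⟨i, ⟨hi, by nlinarith⟩, j, ⟨hj, by nlinarith⟩, he⟩

theorem pvPointwise (m k : Int) (hk1 : 1 ≤ k) (hkm : k < m + 1) :
    (!(false || (PySem.List.pyRange 1 (m + 1) 1).any (fun i =>
        (PySem.List.pyRange 1 (m + 1) 1).any (fun j => i + j + 2 * i * j == k))))
      = pvIsOddPrime (k * 2 + 1) 3 := by
  have hTrial : pvIsOddPrime (k * 2 + 1) 3 = false ↔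
      ∃ e, 3 ≤ e ∧ (e - 3) % 2 = 0 ∧ e * e ≤ k * 2 + 1 ∧ e ∣ (k * 2 + 1) :=
    pvTrial_false_iff (k * 2 + 1) (k * 2 + 1 + 2 - 3).toNat 3 (by omega) (le_refl _)
  have hB := pvBridge k hk1
  rw [Bool.false_or]
  cases htr : pvIsOddPrime (k * 2 + 1) 3 with
  | false =>
    rw [(pvMark_iff hk1 hkm).2 (hB.2 (hTrial.1 htr))]
    rfl
  | true =>
    have hno : ¬ (∃ i j : Int, 1 ≤ i ∧ 1 ≤ j ∧ i + j + 2 * i * j = k) := by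
      intro hE
      rw [hTrial.2 (hB.1 hE)] at htr
      exact Bool.false_eq_true.mp htr
    cases hany : (PySem.List.pyRange 1 (m + 1) 1).any (fun i =>
        (PySem.List.pyRange 1 (m + 1) 1).any (fun j => i + j + 2 * i * j == k)) with
    | false => rfl
    | true => exact absurd ((pvMark_iff hk1 hkm).1 hany) hno

-- ===== VERDICT (by name: the statement is the Claim_ definition above) =====
theorem sundaram_spec : Claim_equal_sundaram := by
  intro n _
  unfold Spec_sundaram sundaram sundaram_alt
  generalize PySem.Int.floordiv (n - 1) 2 = m
  show (((PySem.List.pyRange 1 (m + 1) 1).foldl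
      (fun a i => pvInner i a (PySem.List.pyRange 1 (m + 1) 1))
      (PySem.List.pyRange 1 (m + 1) 1)).filter (fun x => x != 0)).map (fun x => x * 2 + 1)
    = (PySem.List.pyRange 3 (2 * m + 1 + 1) 2).filter (fun c => pvIsOddPrime c 3)
  by_cases hm : 0 ≤ m
  · have harr0 : PySem.List.pyRange 1 (m + 1) 1 = pvCodeArr m (fun _ => false) := by
      simp [pvCodeArr]
    have houter := pvOuter_eq hm (PySem.List.pyRange 1 (m + 1) 1)
      (fun i hi => ((PySem.List.mem_pyRange_one).1 hi).1) (fun _ => false)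
    rw [← harr0] at houter
    rw [houter]
    unfold pvCodeArr
    rw [pvFilter_code_aux _ _ (fun k hk => ((PySem.List.mem_pyRange_one).1 hk).1)]
    rw [pvOdds m, List.filter_map]
    congr 1
    apply List.filter_congr
    intro k hk
    have hk' := (PySem.List.mem_pyRange_one).1 hk
    simpa only [Function.comp] using pvPointwise m k hk'.1 hk'.2
  · rw [PySem.List.pyRange_one_eq_nil (by omega), pvOdds m,
      PySem.List.pyRange_one_eq_nil (by omega)]
    simp
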